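-- pv_equiv track=rewrite | github.com/SanyogitaPiya/LLM4TDD | RQ2/code2315.py | code2315
-- ===== SOURCE A (Python) =====
-- def code2315(s: str) -> int:
--     count = 0
--     ans = 0
--
--     for i in range(len(s)):
--         if s[i] == '|':
--             count += 1
--         elif s[i] == '*' and count % 2 == 0:
--             ans += 1
--
--     return ans
-- ===== SOURCE B (Python) =====
-- def code2315(s: str) -> int:
--     return sum(seg.count('*') for i, seg in enumerate(s.split('|')) if i % 2 == 0)
-- ===== Notes on version B (the rewrite author's own statement) =====
-- stated objective: simpler
-- what changed: Replaces the index loop with its running bar-parity counter by splitting the string on the bar character and summing the star-counts of the even-indexed segments (a star's segment index equals the number of bars before it).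
import Mathlib
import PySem

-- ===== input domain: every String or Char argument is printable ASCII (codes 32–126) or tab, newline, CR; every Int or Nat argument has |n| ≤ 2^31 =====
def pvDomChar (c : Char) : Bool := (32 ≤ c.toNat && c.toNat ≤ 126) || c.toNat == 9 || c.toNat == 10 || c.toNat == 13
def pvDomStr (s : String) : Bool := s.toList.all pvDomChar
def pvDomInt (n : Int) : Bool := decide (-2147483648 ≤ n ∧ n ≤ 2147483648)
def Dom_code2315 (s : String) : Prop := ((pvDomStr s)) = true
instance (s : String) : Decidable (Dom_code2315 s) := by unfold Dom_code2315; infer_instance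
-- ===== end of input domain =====

-- B replaces A's index loop with a bar-parity counter by split('|') + summing '*'-counts of even-indexed segments (objective: simpler).

-- ===== PORT A =====
-- for i in range(len(s)): track (count, ans); return ans
def code2315 (s : String) : Int :=
  ((PySem.List.pyRange 0 (PySem.Str.len s) 1).foldl
    (fun (st : Int × Int) i =>
      (fun (st : Int × Int) (c : Char) =>
        if c == '|' then (st.1 + 1, st.2)
        else if c == '*' && (PySem.Int.mod st.1 2 == 0) then (st.1, st.2 + 1)
        else st) st (PySem.List.pyGetD s.toList i ' ')) ((0 : Int), (0 : Int))).2

-- ===== PORT B =====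
-- sum(seg.count('*') for i, seg in enumerate(s.split('|')) if i % 2 == 0)
def code2315_alt (s : String) : Int :=
  (PySem.List.enumerate (PySem.Chars.splitOn s.toList ['|'])).foldl
    (fun acc p =>
      if PySem.Int.mod p.1 2 == 0 then acc + (PySem.Chars.count p.2 ['*'] : Int) else acc) 0

-- ===== PRECONDITION & SPEC =====
def Spec_code2315 (s : String) (out : Int) : Prop := out = code2315_alt s
instance (s : String) (out : Int) : Decidable (Spec_code2315 s out) := by unfold Spec_code2315; infer_instance

-- ===== CLAIM (what is proved, stated in full; the proofs are below) =====
def Claim_equal_code2315 : Prop := ∀ (s : String), Dom_code2315 s → Spec_code2315 s (code2315 s)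

-- ===== LEMMAS AND PROOFS =====

-- reference split: Python s.split('|') as a structural recursion
def pvSplit : List Char → List (List Char)
  | [] => [[]]
  | c :: cs =>
    if c = '|' then [] :: pvSplit cs
    else match pvSplit cs with
      | [] => [[c]]
      | h :: t => (c :: h) :: t

lemma pvSplit_ne_nil (cs : List Char) : pvSplit cs ≠ [] := by
  cases cs with
  | nil => simp [pvSplit]
  | cons c cs =>
    simp only [pvSplit]
    split
    · simp
    · split <;> simp

-- sum of '*'-counts of even-indexed segments, parity carried explicitly
def pvEsum : Int → List (List Char) → Int
  | _, [] => 0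
  | p, seg :: rest => (if p = 0 then (seg.count '*' : Int) else 0) + pvEsum (1 - p) rest

lemma count_go_star (fuel : Nat) : ∀ (l : List Char) (acc : Nat), l.length ≤ fuel →
    PySem.Chars.count.go ['*'] fuel l acc = acc + l.count '*' := by
  induction fuel with
  | zero => intro l acc h; interval_cases h' : l.length <;> simp_all [PySem.Chars.count.go,
      List.length_eq_zero_iff.mp h']
  | succ n ih =>
    intro l acc h
    cases l with
    | nil => simp [PySem.Chars.count.go]
    | cons c t =>
      simp only [PySem.Chars.count.go, List.isPrefixOf, List.length_cons] at *
      by_cases hc : c = '*'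
      · simp [hc, ih t (acc + 1) (by omega)]
        omega
      · have : ('*' == c) = false := by simp [BEq.beq]; exact fun h => hc h.symm
        simp [this, ih t acc (by omega), hc]

lemma count_star (cs : List Char) : PySem.Chars.count cs ['*'] = cs.count '*' := by
  simp [PySem.Chars.count, count_go_star cs.length cs 0 le_rfl]

lemma splitOn_go_bar (fuel : Nat) : ∀ (l cur : List Char) (acc : List (List Char)),
    l.length ≤ fuel →
    PySem.Chars.splitOn.go ['|'] fuel l cur acc =
      acc.reverse ++ (match pvSplit l with
        | [] => [cur.reverse]
        | h :: t => (cur.reverse ++ h) :: t) := by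
  induction fuel with
  | zero =>
    intro l cur acc h
    have : l = [] := List.length_eq_zero_iff.mp (by omega)
    subst this
    simp [PySem.Chars.splitOn.go, pvSplit]
  | succ n ih =>
    intro l cur acc h
    cases l with
    | nil => simp [PySem.Chars.splitOn.go, pvSplit]
    | cons c t =>
      simp only [PySem.Chars.splitOn.go, List.isPrefixOf, List.length_cons] at *
      rw [Bool.and_true]
      by_cases hc : c = '|'
      · have hb : ('|' == c) = true := by simp [hc]
        rw [hb]
        simp only [if_true]
        simp only [List.length_nil]
        rw [ih (List.drop (0 + 1) (c :: t)) [] (cur.reverse :: acc) (by simp; omega)]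
        simp only [List.drop_succ_cons, List.drop_zero, List.reverse_cons, List.reverse_nil]
        have hne := pvSplit_ne_nil t
        cases hsp : pvSplit t with
        | nil => exact absurd hsp hne
        | cons h' t' => simp [pvSplit, hc, hsp]
      · have hb : ('|' == c) = false := by
          simp [BEq.beq]; intro h'; exact absurd h'.symm hc
        rw [hb]
        simp only [Bool.false_eq_true, if_false]
        rw [ih t (c :: cur) acc (by omega)]
        have hne := pvSplit_ne_nil t
        cases hsp : pvSplit t with
        | nil => exact absurd hsp hne
        | cons h' t' => simp [pvSplit, hc, hsp]

lemma splitOn_eq_pvSplit (cs : List Char) : PySem.Chars.splitOn cs ['|'] = pvSplit cs := by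
  unfold PySem.Chars.splitOn
  rw [splitOn_go_bar (cs.length + 1) cs [] [] (by omega)]
  have hne := pvSplit_ne_nil cs
  cases hsp : pvSplit cs with
  | nil => exact absurd hsp hne
  | cons h t => simp

lemma mod_succ_two (k : Int) : PySem.Int.mod (k + 1) 2 = 1 - PySem.Int.mod k 2 := by
  rw [PySem.Int.mod_eq_emod_of_pos (by norm_num), PySem.Int.mod_eq_emod_of_pos (by norm_num)]
  omega

-- B's enumerate fold computes pvEsum of the start parity
lemma b_fold_eq (segs : List (List Char)) : ∀ (k a : Int),
    (PySem.List.enumerate segs k).foldl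
      (fun acc p =>
        if PySem.Int.mod p.1 2 == 0 then acc + (PySem.Chars.count p.2 ['*'] : Int) else acc) a
    = a + pvEsum (PySem.Int.mod k 2) segs := by
  induction segs with
  | nil => intro k a; simp [PySem.List.enumerate, pvEsum]
  | cons seg rest ih =>
    intro k a
    rw [PySem.List.enumerate_cons]
    simp only [List.foldl_cons]
    rw [ih (k + 1), mod_succ_two]
    rcases PySem.Int.mod_two_eq k with h | h <;> rw [h] <;>
      simp [count_star, pvEsum] <;> ring

-- A's char fold computes pvEsum of pvSplit at the running bar parity
lemma a_fold_eq (cs : List Char) : ∀ (count ans : Int),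
    (cs.foldl
      (fun (st : Int × Int) (c : Char) =>
        if c == '|' then (st.1 + 1, st.2)
        else if c == '*' && (PySem.Int.mod st.1 2 == 0) then (st.1, st.2 + 1)
        else st) (count, ans)).2
    = ans + pvEsum (PySem.Int.mod count 2) (pvSplit cs) := by
  induction cs with
  | nil => intro count ans; simp [pvSplit, pvEsum]
  | cons c cs ih =>
    intro count ans
    simp only [List.foldl_cons]
    by_cases hc : c = '|'
    · rw [if_pos (by simp [hc])]
      rw [ih (count + 1) ans, mod_succ_two]
      rcases PySem.Int.mod_two_eq count with h | h <;> rw [h] <;>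
        simp [pvSplit, hc, pvEsum]
    · rw [if_neg (by simp [hc])]
      have hne := pvSplit_ne_nil cs
      cases hsp : pvSplit cs with
      | nil => exact absurd hsp hne
      | cons h t =>
        have hm : count % 2 = PySem.Int.mod count 2 :=
          (PySem.Int.mod_eq_emod_of_pos (by norm_num)).symm
        rcases PySem.Int.mod_two_eq count with hp | hp <;> rw [hp] at hm
        · have hd : (2:Int) ∣ count := Int.dvd_of_emod_eq_zero hm
          by_cases hcs : c = '*'
          · rw [if_pos (by simp [hcs, hp, hd])]
            rw [ih count (ans + 1), hsp]
            simp [pvSplit, if_neg hc, hsp, pvEsum, hp, List.count_cons, hcs, hd]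
            push_cast
            ring
          · rw [if_neg (by simp [hcs])]
            rw [ih count ans, hsp]
            simp [pvSplit, if_neg hc, hsp, pvEsum, hp, List.count_cons, hcs]
        · have hd : ¬ (2:Int) ∣ count := by omega
          rw [if_neg (by simp [hp, hd])]
          rw [ih count ans, hsp]
          simp [pvSplit, if_neg hc, hsp, pvEsum, hp, hd]

-- ===== VERDICT (by name: the statement is the Claim_ definition above) =====
theorem code2315_spec : Claim_equal_code2315 := by
  intro s _
  unfold Spec_code2315 code2315 code2315_alt
  rw [PySem.Str.len_eq, PySem.List.foldl_pyRange_zero_pyGetD' s.toList ' '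
    (fun (st : Int × Int) (c : Char) =>
      if c == '|' then (st.1 + 1, st.2)
      else if c == '*' && (PySem.Int.mod st.1 2 == 0) then (st.1, st.2 + 1)
      else st) ((0 : Int), (0 : Int))]
  rw [a_fold_eq, b_fold_eq, splitOn_eq_pvSplit]
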